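-- pv_equiv track=rewrite | github.com/kovkir/bmstu-information-security | lab_04/src/encoder.py | calculatePQ
-- ===== SOURCE A (Python) =====
-- def calculatePQ(max_number: int):
--     '''
--     Алгоритм поиска простых чисел "Решето Эратосфена"
--     '''
--     arrNumb = list(numb for numb in range(2, max_number))
--     lenArrNumb = len(arrNumb)
--
--     for i in range(lenArrNumb):
--         if arrNumb[i] == 0:
--             continue
--
--         step = arrNumb[i]
--         for j in range(i + step, lenArrNumb, step):
--             arrNumb[j] = 0
--
--     p = 0
--     q = 0
--     # выбор двух последних ненулевых элементов массива
--     for i in range(lenArrNumb - 1, -1, -1):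
--         if arrNumb[i] != 0:
--             if p == 0:
--                 p = arrNumb[i]
--             else:
--                 q = arrNumb[i]
--                 break
--
--     return p, q
-- ===== SOURCE B (Python) =====
-- def calculatePQ(max_number: int):
--     def is_prime(n):
--         if n < 2:
--             return False
--         d = 2
--         while d * d <= n:
--             if n % d == 0:
--                 return False
--             d += 1
--         return True
--
--     def largest_prime_below(limit):
--         n = limit - 1
--         while n >= 2:
--             if is_prime(n):
--                 return n
--             n -= 1
--         return 0
--
--     p = largest_prime_below(max_number)
--     q = largest_prime_below(p)
--     return p, q
-- ===== Notes on version B (the rewrite author's own statement) =====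
-- stated objective: faster
-- what changed: Replaces the full Sieve of Eratosthenes over [2, max_number) plus a backward scan by a downward scan from max_number-1 that trial-divides each candidate up to its square root, stopping at the first two primes found.
import Mathlib
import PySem

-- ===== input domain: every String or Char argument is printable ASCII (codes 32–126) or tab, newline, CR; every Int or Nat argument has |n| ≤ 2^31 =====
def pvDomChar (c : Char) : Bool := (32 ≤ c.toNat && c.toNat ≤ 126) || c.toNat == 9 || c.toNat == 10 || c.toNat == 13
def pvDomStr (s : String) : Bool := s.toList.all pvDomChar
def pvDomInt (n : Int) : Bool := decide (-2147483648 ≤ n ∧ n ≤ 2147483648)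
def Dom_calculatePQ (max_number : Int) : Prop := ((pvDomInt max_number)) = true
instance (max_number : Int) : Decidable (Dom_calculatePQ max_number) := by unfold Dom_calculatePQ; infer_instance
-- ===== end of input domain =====

-- B replaces A's full Sieve of Eratosthenes by a downward scan from max_number with
-- trial division up to √n (objective: faster — only the gap below max_number is examined).

-- ===== PORT A =====
-- inner loop 'for j in range(i+step, lenArrNumb, step): arrNumb[j] = 0'.
-- fuel = arr.size + 1 never cuts the loop short: step ≥ 1 at every call, so the loop
-- body runs at most arr.size times; the recursion stops exactly when j ≥ len(arr).
def markMultiples : Nat → Array Int → Nat → Nat → Array Int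
  | 0, arr, _, _ => arr
  | fuel + 1, arr, j, step =>
      if j < arr.size then markMultiples fuel (arr.setIfInBounds j 0) (j + step) step else arr

-- one iteration of the outer sieve loop (index i is always in range, and arrNumb[i] is
-- i+2 when nonzero, hence ≥ 0, so List.getD / Int.toNat are exact here)
def sieveStep (arr : Array Int) (i : Nat) : Array Int :=
  let v := arr.getD i 0
  if v = 0 then arr
  else markMultiples (arr.size + 1) arr (i + v.toNat) v.toNat

-- 'for i in range(lenArrNumb-1, -1, -1)' with the break: i is the number of indices
-- still to visit (next index visited is i-1); p, q are the loop accumulators.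
def selectLoop : Array Int → Nat → Int → Int → Int × Int
  | _, 0, p, q => (p, q)
  | arr, i + 1, p, q =>
      let v := arr.getD i 0
      if v ≠ 0 then
        if p = 0 then selectLoop arr i v q
        else (p, v)          -- break
      else selectLoop arr i p q

def calculatePQ (max_number : Int) : List Int :=
  let arr0 := (PySem.List.pyRange 2 max_number 1).toArray   -- a Python list of ints, mutated in place
  let arr := (List.range arr0.size).foldl sieveStep arr0    -- len(arr) never changes
  let pq := selectLoop arr arr0.size 0 0
  [pq.1, pq.2]

-- ===== PORT B =====
-- 'while d * d <= n: if n % d == 0: return False; d += 1'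
def isPrimeTrial (n : Int) (d : Int) : Bool :=
  if h : d * d ≤ n then
    (if PySem.Int.mod n d = 0 then false else isPrimeTrial n (d + 1))
  else true
  termination_by (n + 1 - d).toNat
  decreasing_by
    have h1 : 2 * d - 1 ≤ n := by nlinarith [sq_nonneg (d - 1)]
    have h2 : (0 : Int) ≤ n := by nlinarith [sq_nonneg d]
    omega

def isPrime (n : Int) : Bool :=
  if n < 2 then false else isPrimeTrial n 2

-- 'n = limit - 1; while n >= 2: …; n -= 1'
def lpbLoop (n : Int) : Int :=
  if h : 2 ≤ n then (if isPrime n then n else lpbLoop (n - 1)) else 0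
  termination_by n.toNat
  decreasing_by omega

def largestPrimeBelow (limit : Int) : Int := lpbLoop (limit - 1)

def calculatePQ_alt (max_number : Int) : List Int :=
  let p := largestPrimeBelow max_number
  let q := largestPrimeBelow p
  [p, q]

-- ===== PRECONDITION & SPEC =====
def Spec_calculatePQ (max_number : Int) (out : List Int) : Prop := out = calculatePQ_alt max_number
instance (max_number : Int) (out : List Int) : Decidable (Spec_calculatePQ max_number out) := by unfold Spec_calculatePQ; infer_instance

-- ===== CLAIM (what is proved, stated in full; the proofs are below) =====
def Claim_equal_calculatePQ : Prop := ∀ (max_number : Int), Dom_calculatePQ max_number → Spec_calculatePQ max_number (calculatePQ max_number)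

-- ===== LEMMAS AND PROOFS =====

-- 'n has a proper divisor ≥ 2' (i.e. n is composite, for n ≥ 2)
abbrev HasDivN (n : Nat) : Prop := ∃ d < n, 2 ≤ d ∧ d ∣ n

-- the divisors recorded by the first t outer sieve iterations, at array slot j (value j+2)
abbrev SieveC (t j : Nat) : Prop := ∃ d < j + 2, 2 ≤ d ∧ d ≤ t + 1 ∧ d ∣ (j + 2)

theorem lpbLoop_of_lt (n : Int) (h : n < 2) : lpbLoop n = 0 := by
  rw [lpbLoop, dif_neg (by omega)]

-- Array.getD through getElem?
theorem agetD (a : Array Int) (i : Nat) : a.getD i 0 = a[i]?.getD 0 := by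
  unfold Array.getD
  split <;> rename_i h
  · rw [Array.getElem?_eq_getElem h]; rfl
  · rw [Array.getElem?_eq_none (by omega)]; rfl

-- one unfolding of the selection loop (definitional)
theorem selectLoop_succ (arr : Array Int) (i : Nat) (p q : Int) :
    selectLoop arr (i + 1) p q =
      if arr.getD i 0 ≠ 0 then
        (if p = 0 then selectLoop arr i (arr.getD i 0) q else (p, arr.getD i 0))
      else selectLoop arr i p q := rfl

theorem markMultiples_size (fuel : Nat) (arr : Array Int) (s step : Nat) :
    (markMultiples fuel arr s step).size = arr.size := by
  induction fuel generalizing arr s with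
  | zero => rfl
  | succ fuel ih =>
      simp only [markMultiples]
      split
      · rw [ih]; simp
      · rfl

-- shifting the start of an arithmetic progression by one step
theorem dvd_sub_shift (step s j : Nat) (h2 : s + step ≤ j) :
    step ∣ (j - (s + step)) ↔ step ∣ (j - s) := by
  have hsplit : j - s = (j - (s + step)) + step := by omega
  rw [hsplit]
  constructor
  · intro h; exact Nat.dvd_add h (dvd_refl step)
  · intro h; rw [Nat.add_comm] at h; exact (Nat.dvd_add_right (dvd_refl step)).mp h

theorem markMultiples_getD (fuel : Nat) (arr : Array Int) (s step j : Nat)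
    (hstep : 1 ≤ step) (hfuel : arr.size ≤ s + fuel) :
    (markMultiples fuel arr s step).getD j 0 =
      if s ≤ j ∧ j < arr.size ∧ step ∣ (j - s) then 0 else arr.getD j 0 := by
  induction fuel generalizing arr s with
  | zero =>
      simp only [markMultiples]
      rw [if_neg]; omega
  | succ fuel ih =>
      simp only [markMultiples]
      split
      · rename_i hs
        rw [ih (arr.setIfInBounds s 0) (s + step) (by simp; omega)]
        simp only [Array.size_setIfInBounds]
        by_cases hj : j = s
        · subst hj
          rw [if_neg (by omega), if_pos ⟨le_refl _, hs, by simp⟩]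
          rw [agetD, Array.getElem?_setIfInBounds_self_of_lt (by omega)]
          rfl
        · have hset : (arr.setIfInBounds s 0).getD j 0 = arr.getD j 0 := by
            rw [agetD, Array.getElem?_setIfInBounds_ne (by omega), ← agetD]
          rw [hset]
          congr 1
          simp only [eq_iff_iff]
          constructor
          · rintro ⟨h1, h2, h3⟩
            exact ⟨by omega, h2, (dvd_sub_shift step s j h1).mp h3⟩
          · rintro ⟨h1, h2, h3⟩
            have hge : step ≤ j - s := Nat.le_of_dvd (by omega) h3
            have h1' : s + step ≤ j := by omega
            exact ⟨h1', h2, (dvd_sub_shift step s j h1').mpr h3⟩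
      · rw [if_neg]; omega

-- the positions zeroed while processing index t are the proper multiples of t+2
theorem markCond_iff (t j : Nat) :
    (t + (t + 2) ≤ j ∧ (t + 2) ∣ (j - (t + (t + 2)))) ↔
      ((t + 2) ∣ (j + 2) ∧ t + 2 < j + 2) := by
  constructor
  · rintro ⟨h1, h2⟩
    have hsplit : j + 2 = (j - (t + (t + 2))) + 2 * (t + 2) := by omega
    refine ⟨hsplit ▸ Nat.dvd_add h2 ⟨2, Nat.mul_comm _ _⟩, by omega⟩
  · rintro ⟨⟨k, hk⟩, hlt⟩
    have hk2 : 2 ≤ k := by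
      rcases Nat.lt_or_ge k 2 with h | h
      · interval_cases k <;> omega
      · exact h
    have hge : 2 * (t + 2) ≤ j + 2 := by
      calc 2 * (t + 2) = (t + 2) * 2 := Nat.mul_comm _ _
        _ ≤ (t + 2) * k := Nat.mul_le_mul_left _ hk2
        _ = j + 2 := hk.symm
    refine ⟨by omega, ?_⟩
    have hd : (t + 2) ∣ (j + 2 - 2 * (t + 2)) := Nat.dvd_sub ⟨k, hk⟩ ⟨2, Nat.mul_comm _ _⟩
    have heq : j + 2 - 2 * (t + 2) = j - (t + (t + 2)) := by omega
    rwa [heq] at hd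

-- how the recorded-divisor set grows in one outer iteration
theorem sieveC_succ (t j : Nat) :
    SieveC (t + 1) j ↔ SieveC t j ∨ ((t + 2) ∣ (j + 2) ∧ t + 2 < j + 2) := by
  constructor
  · rintro ⟨d, hlt, h2, hle, hdvd⟩
    by_cases hdt : d = t + 2
    · exact Or.inr ⟨hdt ▸ hdvd, hdt ▸ hlt⟩
    · exact Or.inl ⟨d, hlt, h2, by omega, hdvd⟩
  · rintro (⟨d, hlt, h2, hle, hdvd⟩ | ⟨hdvd, hlt⟩)
    · exact ⟨d, hlt, h2, by omega, hdvd⟩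
    · exact ⟨t + 2, hlt, by omega, by omega, hdvd⟩

-- length of the base array
theorem arr0_size (m : Int) : (PySem.List.pyRange 2 m 1).toArray.size = (m - 2).toNat := by
  rw [List.size_toArray, PySem.List.length_pyRange_one]

theorem arr0_getD (m : Int) (j : Nat) :
    (PySem.List.pyRange 2 m 1).toArray.getD j 0 =
      if j < (m - 2).toNat then (j : Int) + 2 else 0 := by
  rw [agetD, List.getElem?_toArray, PySem.List.pyRange_one]
  by_cases hj : j < (m - 2).toNat
  · rw [List.getElem?_map, List.getElem?_range hj, if_pos hj]
    simp only [Option.map_some, Option.getD_some]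
    omega
  · rw [List.getElem?_eq_none (by simpa using hj), if_neg hj]
    simp

-- the sieve invariant, by induction on the number of outer iterations
theorem sieve_inv (m : Int) (t : Nat) (ht : t ≤ (m - 2).toNat) :
    ((List.range t).foldl sieveStep (PySem.List.pyRange 2 m 1).toArray).size = (m - 2).toNat ∧
      ∀ j : Nat, ((List.range t).foldl sieveStep (PySem.List.pyRange 2 m 1).toArray).getD j 0 =
        if j < (m - 2).toNat ∧ SieveC t j then 0 else (PySem.List.pyRange 2 m 1).toArray.getD j 0 := by
  induction t with
  | zero =>
      refine ⟨arr0_size m, fun j => ?_⟩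
      rw [if_neg (by rintro ⟨-, d, hlt, h2, hle, hdvd⟩; omega)]
      simp
  | succ t ih =>
      obtain ⟨ihlen, ihget⟩ := ih (by omega)
      set arrt := (List.range t).foldl sieveStep (PySem.List.pyRange 2 m 1).toArray with harrt
      have hstep : (List.range (t + 1)).foldl sieveStep (PySem.List.pyRange 2 m 1).toArray
          = sieveStep arrt t := by
        rw [List.range_succ, List.foldl_append]; rfl
      have htL : t < (m - 2).toNat := by omega
      have hvt : arrt.getD t 0 = if SieveC t t then 0 else (t : Int) + 2 := by
        rw [ihget t, arr0_getD]
        by_cases h : SieveC t t <;> simp [htL, h]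
      rw [hstep]
      by_cases hC : SieveC t t
      · -- arr[t] == 0 : continue; the recorded-divisor set does not grow
        have hv0 : arrt.getD t 0 = 0 := by rw [hvt, if_pos hC]
        have hred : sieveStep arrt t = arrt := by
          simp only [sieveStep, hv0]; simp
        rw [hred]
        refine ⟨ihlen, fun j => ?_⟩
        rw [ihget j]
        congr 1
        simp only [eq_iff_iff]
        constructor
        · rintro ⟨hjL, hCj⟩
          exact ⟨hjL, (sieveC_succ t j).mpr (Or.inl hCj)⟩
        · rintro ⟨hjL, hCj⟩
          refine ⟨hjL, ?_⟩
          rcases (sieveC_succ t j).mp hCj with h | ⟨hdvd, hlt⟩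
          · exact h
          · obtain ⟨a, halt, ha2, hale, hadvd⟩ := hC
            exact ⟨a, by omega, ha2, hale, hadvd.trans hdvd⟩
      · -- arr[t] == t+2 : mark the proper multiples of t+2
        have hv : arrt.getD t 0 = (t : Int) + 2 := by rw [hvt, if_neg hC]
        have hvnz : ¬ arrt.getD t 0 = 0 := by rw [hv]; omega
        have hvtoNat : (arrt.getD t 0).toNat = t + 2 := by rw [hv]; omega
        have hred : sieveStep arrt t = markMultiples (arrt.size + 1) arrt (t + (t + 2)) (t + 2) := by
          simp only [sieveStep, if_neg hvnz, hvtoNat]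
        rw [hred]
        refine ⟨by rw [markMultiples_size, ihlen], fun j => ?_⟩
        rw [markMultiples_getD _ _ _ _ _ (by omega) (by omega), ihlen, ihget j]
        by_cases hjL : j < (m - 2).toNat
        · by_cases hnew : (t + 2) ∣ (j + 2) ∧ t + 2 < j + 2
          · have hm := (markCond_iff t j).mpr hnew
            have hcond : t + (t + 2) ≤ j ∧ j < (m - 2).toNat ∧ (t + 2) ∣ (j - (t + (t + 2))) :=
              ⟨hm.1, hjL, hm.2⟩
            rw [if_pos hcond, if_pos ⟨hjL, (sieveC_succ t j).mpr (Or.inr hnew)⟩]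
          · have hnotm : ¬ (t + (t + 2) ≤ j ∧ j < (m - 2).toNat ∧ (t + 2) ∣ (j - (t + (t + 2)))) := by
              rintro ⟨h1, h2, h3⟩
              exact hnew ((markCond_iff t j).mp ⟨h1, h3⟩)
            rw [if_neg hnotm]
            congr 1
            simp only [eq_iff_iff]
            constructor
            · rintro ⟨hjL', hCj⟩
              exact ⟨hjL', (sieveC_succ t j).mpr (Or.inl hCj)⟩
            · rintro ⟨hjL', hCj⟩
              rcases (sieveC_succ t j).mp hCj with h | h
              · exact ⟨hjL', h⟩
              · exact absurd h hnew
        · rw [if_neg (fun hc => hjL hc.2.1), if_neg (fun hc => hjL hc.1),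
            if_neg (fun hc => hjL hc.1)]

-- final sieve contents: slot j holds j+2 iff j+2 has no proper divisor ≥ 2
theorem sieve_final (m : Int) (j : Nat) :
    ((List.range ((m - 2).toNat)).foldl sieveStep (PySem.List.pyRange 2 m 1).toArray).getD j 0 =
      if j < (m - 2).toNat ∧ ¬ HasDivN (j + 2) then (j : Int) + 2 else 0 := by
  obtain ⟨-, hget⟩ := sieve_inv m ((m - 2).toNat) le_rfl
  rw [hget j, arr0_getD]
  have hfwd : SieveC ((m - 2).toNat) j → HasDivN (j + 2) := by
    rintro ⟨d, hlt, h2, hle, hdvd⟩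
    exact ⟨d, hlt, h2, hdvd⟩
  have hbwd : j < (m - 2).toNat → HasDivN (j + 2) → SieveC ((m - 2).toNat) j := by
    rintro hjL ⟨d, hlt, h2, hdvd⟩
    exact ⟨d, hlt, h2, by omega, hdvd⟩
  by_cases hjL : j < (m - 2).toNat
  · by_cases hH : HasDivN (j + 2)
    · rw [if_pos ⟨hjL, hbwd hjL hH⟩, if_neg (fun hc => hc.2 hH)]
    · rw [if_neg (fun hc => hH (hfwd hc.2)), if_pos hjL, if_pos ⟨hjL, hH⟩]
  · rw [if_neg (fun hc => hjL hc.1), if_neg hjL, if_neg (fun hc => hjL hc.1)]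

-- trial division is sound: if the loop reports "prime", no e ≥ d with e*e ≤ n divides n
theorem isPrimeTrial_sound (n d : Int) (hd : 2 ≤ d) (h : isPrimeTrial n d = true) :
    ∀ e : Int, d ≤ e → e * e ≤ n → ¬ e ∣ n := by
  induction d using isPrimeTrial.induct (n := n) with
  | case1 d hdd hmod =>
      rw [isPrimeTrial, dif_pos hdd, if_pos hmod] at h
      exact absurd h (by simp)
  | case2 d hdd hmod ih =>
      rw [isPrimeTrial, dif_pos hdd, if_neg hmod] at h
      intro e hde hee hdvd
      by_cases hed : e = d
      · subst hed
        exact hmod ((PySem.Int.mod_eq_zero_iff_dvd n e).mpr hdvd)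
      · exact ih (by omega) h e (by omega) hee hdvd
  | case3 d hdd =>
      intro e hde hee
      exfalso
      have h1 : d * d ≤ e * e := by nlinarith
      omega

-- trial division is complete: a composite n is caught
theorem isPrimeTrial_complete (n d : Int) (hd : 2 ≤ d)
    (h : ∀ e : Int, d ≤ e → e * e ≤ n → ¬ e ∣ n) : isPrimeTrial n d = true := by
  induction d using isPrimeTrial.induct (n := n) with
  | case1 d hdd hmod =>
      exact absurd ((PySem.Int.mod_eq_zero_iff_dvd n d).mp hmod)
        (h d le_rfl hdd)
  | case2 d hdd hmod ih =>
      rw [isPrimeTrial, dif_pos hdd, if_neg hmod]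
      exact ih (by omega) (fun e he => h e (by omega))
  | case3 d hdd =>
      rw [isPrimeTrial, dif_neg hdd]

theorem isPrime_iff (k : Nat) (hk : 2 ≤ k) : isPrime (k : Int) = true ↔ ¬ HasDivN k := by
  rw [isPrime, if_neg (by omega)]
  constructor
  · intro h hdiv
    obtain ⟨d, hdk, hd2, c, hc⟩ := hdiv
    have hc2 : 2 ≤ c := by
      rcases Nat.lt_or_ge c 2 with hcl | hcl
      · interval_cases c <;> omega
      · exact hcl
    have hcast : (k : Int) = (d : Int) * (c : Int) := by exact_mod_cast hc
    by_cases hdc : d ≤ c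
    · refine isPrimeTrial_sound (k : Int) 2 le_rfl h (d : Int)
        (by exact_mod_cast hd2) ?_ ⟨(c : Int), hcast⟩
      have : d * d ≤ k := by calc d * d ≤ d * c := Nat.mul_le_mul_left _ hdc
                                 _ = k := hc.symm
      exact_mod_cast this
    · refine isPrimeTrial_sound (k : Int) 2 le_rfl h (c : Int)
        (by exact_mod_cast hc2) ?_ ⟨(d : Int), by rw [hcast, mul_comm]⟩
      have : c * c ≤ k := by calc c * c ≤ c * d := Nat.mul_le_mul_left _ (by omega)
                                 _ = k := by rw [Nat.mul_comm]; exact hc.symm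
      exact_mod_cast this
  · intro h
    refine isPrimeTrial_complete (k : Int) 2 le_rfl (fun e he1 hee hdvd => ?_)
    have hen : e < (k : Int) := by nlinarith
    have he0 : (0 : Int) ≤ e := by omega
    refine h ⟨e.toNat, by omega, by omega, ?_⟩
    have : ((e.toNat : Int)) ∣ (k : Int) := by rwa [Int.toNat_of_nonneg he0]
    exact_mod_cast this

theorem isPrime_shift (i : Nat) : isPrime ((i : Int) + 2) = true ↔ ¬ HasDivN (i + 2) := by
  have h : ((i : Int) + 2) = ((i + 2 : Nat) : Int) := by push_cast; ring
  rw [h]; exact isPrime_iff (i + 2) (by omega)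

-- phase 2 of A's selection loop (p already found): scans down for the next prime
theorem selectLoop_phase2 (m : Int) (i : Nat) (hi : i ≤ (m - 2).toNat)
    (p : Int) (hp : ¬ p = 0) :
    selectLoop ((List.range ((m - 2).toNat)).foldl sieveStep (PySem.List.pyRange 2 m 1).toArray)
        i p 0 = (p, lpbLoop ((i : Int) + 1)) := by
  induction i with
  | zero =>
      simp only [selectLoop]
      rw [lpbLoop_of_lt _ (by norm_num)]
  | succ i ih =>
      have hiL : i < (m - 2).toNat := by omega
      have hcast : (((i : Nat) + 1 : Nat) : Int) + 1 = (i : Int) + 2 := by push_cast; ring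
      rw [hcast]
      by_cases hdiv : HasDivN (i + 2)
      · have hprime : isPrime ((i : Int) + 2) = false := by
          cases hh : isPrime ((i : Int) + 2)
          · rfl
          · exact absurd hdiv (by simpa using (isPrime_shift i).mp hh)
        have hv : ((List.range ((m - 2).toNat)).foldl sieveStep
            (PySem.List.pyRange 2 m 1).toArray).getD i 0 = 0 := by
          rw [sieve_final]; exact if_neg (fun hc => hc.2 hdiv)
        rw [selectLoop_succ, hv]
        rw [if_neg (fun h => h rfl), ih (by omega)]
        rw [show lpbLoop ((i : Int) + 2) = lpbLoop ((i : Int) + 2 - 1) from by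
          rw [lpbLoop, dif_pos (by omega), if_neg (by simp [hprime])]]
        rw [show ((i : Int) + 2 - 1) = (i : Int) + 1 from by ring]
      · have hprime : isPrime ((i : Int) + 2) = true := (isPrime_shift i).mpr hdiv
        have hv : ((List.range ((m - 2).toNat)).foldl sieveStep
            (PySem.List.pyRange 2 m 1).toArray).getD i 0 = (i : Int) + 2 := by
          have hcond : i < (m - 2).toNat ∧ ¬ HasDivN (i + 2) := ⟨hiL, hdiv⟩
          rw [sieve_final, if_pos hcond]
        rw [selectLoop_succ, hv]
        rw [if_pos (show ((i : Int) + 2) ≠ 0 from by omega), if_neg hp]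
        rw [show lpbLoop ((i : Int) + 2) = (i : Int) + 2 from by
          rw [lpbLoop, dif_pos (by omega), if_pos hprime]]

-- phase 1 of A's selection loop (no prime found yet)
theorem selectLoop_phase1 (m : Int) (i : Nat) (hi : i ≤ (m - 2).toNat) :
    selectLoop ((List.range ((m - 2).toNat)).foldl sieveStep (PySem.List.pyRange 2 m 1).toArray)
        i 0 0 = (lpbLoop ((i : Int) + 1), lpbLoop (lpbLoop ((i : Int) + 1) - 1)) := by
  induction i with
  | zero =>
      simp only [selectLoop]
      rw [lpbLoop_of_lt _ (by norm_num)]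
      rw [lpbLoop_of_lt _ (by norm_num)]
  | succ i ih =>
      have hiL : i < (m - 2).toNat := by omega
      have hcast : (((i : Nat) + 1 : Nat) : Int) + 1 = (i : Int) + 2 := by push_cast; ring
      rw [hcast]
      by_cases hdiv : HasDivN (i + 2)
      · have hprime : isPrime ((i : Int) + 2) = false := by
          cases hh : isPrime ((i : Int) + 2)
          · rfl
          · exact absurd hdiv (by simpa using (isPrime_shift i).mp hh)
        have hv : ((List.range ((m - 2).toNat)).foldl sieveStep
            (PySem.List.pyRange 2 m 1).toArray).getD i 0 = 0 := by
          rw [sieve_final]; exact if_neg (fun hc => hc.2 hdiv)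
        rw [selectLoop_succ, hv]
        rw [if_neg (fun h => h rfl), ih (by omega)]
        rw [show lpbLoop ((i : Int) + 2) = lpbLoop ((i : Int) + 2 - 1) from by
          rw [lpbLoop, dif_pos (by omega), if_neg (by simp [hprime])]]
        rw [show ((i : Int) + 2 - 1) = (i : Int) + 1 from by ring]
      · have hprime : isPrime ((i : Int) + 2) = true := (isPrime_shift i).mpr hdiv
        have hv : ((List.range ((m - 2).toNat)).foldl sieveStep
            (PySem.List.pyRange 2 m 1).toArray).getD i 0 = (i : Int) + 2 := by
          have hcond : i < (m - 2).toNat ∧ ¬ HasDivN (i + 2) := ⟨hiL, hdiv⟩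
          rw [sieve_final, if_pos hcond]
        rw [selectLoop_succ, hv]
        rw [if_pos (show ((i : Int) + 2) ≠ 0 from by omega), if_pos rfl]
        rw [selectLoop_phase2 m i (by omega) _ (by omega)]
        rw [show lpbLoop ((i : Int) + 2) = (i : Int) + 2 from by
          rw [lpbLoop, dif_pos (by omega), if_pos hprime]]
        rw [show (i : Int) + 2 - 1 = (i : Int) + 1 from by ring]

-- ===== VERDICT (by name: the statement is the Claim_ definition above) =====
theorem calculatePQ_spec : Claim_equal_calculatePQ := by
  intro m _
  unfold Spec_calculatePQ calculatePQ calculatePQ_alt largestPrimeBelow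
  simp only [arr0_size]
  rw [selectLoop_phase1 m ((m - 2).toNat) le_rfl]
  by_cases hm : 2 ≤ m
  · rw [show (((m - 2).toNat : Int) + 1) = m - 1 from by omega]
  · rw [show (((m - 2).toNat : Int) + 1) = 1 from by omega]
    rw [lpbLoop_of_lt (1 : Int) (by norm_num)]
    rw [lpbLoop_of_lt (m - 1) (by omega)]
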